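-- pv_equiv track=rewrite | github.com/boost-devs/coding-test-study | .archive/changwoomon/implementation/12933_오리.py | duckduck
-- ===== SOURCE A (Python) =====
-- from collections import defaultdict
--
-- def duckduck(duck):
--     duck_queue = defaultdict(str)
--     duck_idx = defaultdict(int)
--     quack = "quack"
--
--     for x in duck:
--         k = 1
--         while True:
--             if x == quack[duck_idx[k]]:
--                 duck_queue[k] += x
--                 duck_idx[k] += 1
--                 break
--             if not duck_queue.keys():
--                 return -1
--             if max(duck_queue.keys()) < k:
--                 return -1
--             k += 1
--         for kk in duck_queue.keys():
--             if duck_queue[kk] == "quack":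
--                 duck_queue[kk] = ""
--                 duck_idx[kk] = 0
--
--     for x in duck_queue.values():
--         if x != "":
--             return -1
--
--     return max(duck_queue.keys())
-- ===== SOURCE B (Python) =====
-- def duckduck(duck):
--     # One linear pass: count ducks waiting for each next letter; reuse finished ducks.
--     waiting_u = waiting_a = waiting_c = waiting_k = idle = 0
--     total = 0
--     for x in duck:
--         if x == 'q':
--             if idle > 0:
--                 idle -= 1
--             else:
--                 total += 1
--             waiting_u += 1
--         elif x == 'u':
--             if waiting_u == 0:
--                 return -1
--             waiting_u -= 1
--             waiting_a += 1
--         elif x == 'a':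
--             if waiting_a == 0:
--                 return -1
--             waiting_a -= 1
--             waiting_c += 1
--         elif x == 'c':
--             if waiting_c == 0:
--                 return -1
--             waiting_c -= 1
--             waiting_k += 1
--         elif x == 'k':
--             if waiting_k == 0:
--                 return -1
--             waiting_k -= 1
--             idle += 1
--         else:
--             return -1
--     if waiting_u or waiting_a or waiting_c or waiting_k:
--         return -1
--     return total
-- ===== Notes on version B (the rewrite author's own statement) =====
-- stated objective: faster
-- what changed: A keeps a per-duck dictionary of partial 'quack' strings and scans ducks 1..k for every character; B does one linear pass keeping only five counters of ducks waiting for each next letter (reusing finished ducks), so the per-character duck scan and string building disappear.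
import Mathlib
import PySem

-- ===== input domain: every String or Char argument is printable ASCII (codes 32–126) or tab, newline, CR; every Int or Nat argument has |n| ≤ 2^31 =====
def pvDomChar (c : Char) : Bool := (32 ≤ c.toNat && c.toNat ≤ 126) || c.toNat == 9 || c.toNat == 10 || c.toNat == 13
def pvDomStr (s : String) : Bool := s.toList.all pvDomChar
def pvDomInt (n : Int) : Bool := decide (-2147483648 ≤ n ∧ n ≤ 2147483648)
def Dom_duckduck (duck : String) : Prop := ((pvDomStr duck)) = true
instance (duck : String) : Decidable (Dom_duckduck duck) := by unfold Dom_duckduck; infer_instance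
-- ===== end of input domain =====

-- B replaces A's per-duck dictionaries and inner duck scan by five counters of ducks
-- waiting for each next letter (one linear pass); return values agree on every
-- nonempty string (Pre_; on the empty string A raises ValueError).

-- ===== PORT A =====
-- Inner 'while True' loop of A: returns some k (the duck that takes the char) or
-- none (the loop hit a 'return -1').  The loop always terminates via the
-- 'max(keys) < k' / empty-keys checks, so fuel = max(keys)+2 never runs out.
def pvAWhile (q : PySem.Dict Int String) (d : PySem.Dict Int Int) (x : Char) :
    Int → Nat → Option Int
  | _, 0 => none   -- fuel exhaustion: unreachable (k exceeds max(keys) first)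
  | k, fuel + 1 =>
    match PySem.Str.pyGet? "quack" (d.getD k 0) with
    | none => none -- IndexError: unreachable, duck_idx values stay in [0,4]
    | some c =>
      if x = c then some k
      else if q.keys = [] then none
      else
        match PySem.List.max? q.keys (fun y => y) with
        | none => none
        | some mx => if mx < k then none else pvAWhile q d x (k + 1) fuel

-- 'for kk in duck_queue.keys(): if duck_queue[kk] == "quack": reset'
def pvAReset (keys : List Int) (q : PySem.Dict Int String) (d : PySem.Dict Int Int) :
    PySem.Dict Int String × PySem.Dict Int Int :=
  keys.foldl
    (fun s kk => if s.1.getD kk "" = "quack" then (s.1.insert kk "", s.2.insert kk 0) else s)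
    (q, d)

-- body of 'for x in duck' ( .error r = early 'return r' )
def pvAStep (s : PySem.Dict Int String × PySem.Dict Int Int) (x : Char) :
    Except Int (PySem.Dict Int String × PySem.Dict Int Int) :=
  match pvAWhile s.1 s.2 x 1 (((PySem.List.max? s.1.keys (fun y => y)).getD 0).toNat + 2) with
  | none => .error (-1)
  | some k =>
    let q := s.1.insert k (s.1.getD k "" ++ x.toString)
    let d := s.2.insert k (s.2.getD k 0 + 1)
    .ok (pvAReset q.keys q d)

def pvARun : List Char → PySem.Dict Int String × PySem.Dict Int Int → Int
  | [], s =>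
    if s.1.values.any (fun v => v != "") then -1
    else
      match PySem.List.max? s.1.keys (fun y => y) with
      | some m => m
      | none => 0  -- max() of an empty dict raises ValueError in Python: only for duck = "", outside Pre_
  | x :: xs, s =>
    match pvAStep s x with
    | .error r => r
    | .ok s' => pvARun xs s'

def duckduck (duck : String) : Int :=
  pvARun duck.toList (PySem.Dict.empty, PySem.Dict.empty)

-- ===== PORT B =====
-- state: ducks waiting for 'u','a','c','k', idle (finished) ducks, total ducks used
def pvBGo : List Char → Int → Int → Int → Int → Int → Int → Int
  | [], u, a, c, k, _, total =>
    if u ≠ 0 ∨ a ≠ 0 ∨ c ≠ 0 ∨ k ≠ 0 then -1 else total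
  | x :: xs, u, a, c, k, idle, total =>
    if x = 'q' then
      if idle > 0 then pvBGo xs (u + 1) a c k (idle - 1) total
      else pvBGo xs (u + 1) a c k idle (total + 1)
    else if x = 'u' then
      if u = 0 then -1 else pvBGo xs (u - 1) (a + 1) c k idle total
    else if x = 'a' then
      if a = 0 then -1 else pvBGo xs u (a - 1) (c + 1) k idle total
    else if x = 'c' then
      if c = 0 then -1 else pvBGo xs u a (c - 1) (k + 1) idle total
    else if x = 'k' then
      if k = 0 then -1 else pvBGo xs u a c (k - 1) (idle + 1) total
    else -1

def duckduck_alt (duck : String) : Int :=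
  pvBGo duck.toList 0 0 0 0 0 0

-- ===== PRECONDITION & SPEC =====
-- Pre_ excludes only the empty string, on which A raises ValueError (max() of an empty dict).
def Pre_duckduck (duck : String) : Prop := duck ≠ ""
instance (duck : String) : Decidable (Pre_duckduck duck) := by unfold Pre_duckduck; infer_instance
def pvWitness_duckduck : String := "quack"

def Spec_duckduck (duck : String) (out : Int) : Prop := out = duckduck_alt duck
instance (duck : String) (out : Int) : Decidable (Spec_duckduck duck out) := by unfold Spec_duckduck; infer_instance

-- ===== CLAIM (what is proved, stated in full; the proofs are below) =====
def Claim_equal_duckduck : Prop := ∀ (duck : String), Dom_duckduck duck → Pre_duckduck duck → Spec_duckduck duck (duckduck duck)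

-- ===== LEMMAS AND PROOFS =====

-- the character of "quack" at position i ∈ [0,4]
def pvQC (i : Int) : Char :=
  if i = 1 then 'u' else if i = 2 then 'a' else if i = 3 then 'c' else if i = 4 then 'k' else 'q'

-- the prefix of "quack" of length i ∈ [0,5]
def pvTakeQ (i : Int) : String :=
  if i = 0 then "" else if i = 1 then "q" else if i = 2 then "qu"
  else if i = 3 then "qua" else if i = 4 then "quac" else "quack"

-- reference scan: first j ∈ [k₀, k₀+n) with f j = p
def pvFind (f : Int → Int) (p : Int) : Int → Nat → Option Int
  | _, 0 => none
  | k₀, n + 1 => if f k₀ = p then some k₀ else pvFind f p (k₀ + 1) n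

-- duck keys 1..m
def pvKeys (m : Nat) : List Int := (List.range m).map (fun (i : Nat) => (i : Int) + 1)

-- number of ducks among 1..m at stage v
def pvCnt (m : Nat) (f : Int → Int) (v : Int) : Int :=
  ((List.range m).countP (fun (i : Nat) => f ((i : Int) + 1) = v) : Int)

-- A's abstract state invariant
def pvInv (q : PySem.Dict Int String) (d : PySem.Dict Int Int) (m : Nat) (f : Int → Int) : Prop :=
  q.items = (List.range m).map (fun (i : Nat) => (((i : Int) + 1), pvTakeQ (f ((i : Int) + 1)))) ∧
  (∀ k, d.getD k 0 = f k) ∧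
  (∀ k : Int, (k < 1 ∨ (m : Int) < k) → f k = 0) ∧
  (∀ k : Int, 0 ≤ f k ∧ f k ≤ 4)

lemma pvFive (i : Int) (h0 : 0 ≤ i) (h4 : i ≤ 4) : i = 0 ∨ i = 1 ∨ i = 2 ∨ i = 3 ∨ i = 4 := by omega

lemma pyGet?_quack (i : Int) (h0 : 0 ≤ i) (h4 : i ≤ 4) :
    PySem.Str.pyGet? "quack" i = some (pvQC i) := by
  rcases pvFive i h0 h4 with h | h | h | h | h <;> subst h <;> decide

lemma pvKeys_nodup (m : Nat) : (pvKeys m).Nodup := by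
  unfold pvKeys
  apply List.Nodup.map _ List.nodup_range
  intro a b h
  dsimp at h
  omega

lemma mem_pvKeys (m : Nat) (k : Int) : k ∈ pvKeys m ↔ 1 ≤ k ∧ k ≤ (m : Int) := by
  unfold pvKeys
  simp only [List.mem_map]
  constructor
  · rintro ⟨i, hi, rfl⟩
    have := List.mem_range.mp hi
    omega
  · rintro ⟨h1, h2⟩
    exact ⟨(k - 1).toNat, List.mem_range.mpr (by omega), by omega⟩

lemma pvMax_keys (m : Nat) :
    PySem.List.max? (pvKeys m) (fun y => y) = if m = 0 then none else some (m : Int) := by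
  cases m with
  | zero =>
    rw [if_pos rfl, PySem.List.max?_eq_none_iff]
    rfl
  | succ n =>
    rw [if_neg (Nat.succ_ne_zero n)]
    have hne : pvKeys (n + 1) ≠ [] := by simp [pvKeys]
    cases h : PySem.List.max? (pvKeys (n + 1)) (fun y => y) with
    | none => exact absurd ((PySem.List.max?_eq_none_iff _ _).mp h) hne
    | some v =>
      have hmem := PySem.List.max?_mem h
      have hmax := PySem.List.max?_isMax h
      have h1 : v ≤ ((n + 1 : Nat) : Int) := ((mem_pvKeys _ _).mp hmem).2
      have h2 : ((n + 1 : Nat) : Int) ∈ pvKeys (n + 1) := (mem_pvKeys _ _).mpr ⟨by omega, le_rfl⟩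
      have h3 := hmax _ h2
      have : v = ((n + 1 : Nat) : Int) := le_antisymm h1 h3
      rw [this]

lemma pvFind_none_iff (f : Int → Int) (p : Int) (n : Nat) :
    ∀ k₀ : Int, (pvFind f p k₀ n = none ↔ ∀ j, k₀ ≤ j → j < k₀ + n → f j ≠ p) := by
  induction n with
  | zero =>
    intro k₀
    constructor
    · intro _ j h1 h2 _; omega
    · intro _; rfl
  | succ n ih =>
    intro k₀
    by_cases h : f k₀ = p
    · constructor
      · intro hn; rw [pvFind, if_pos h] at hn; cases hn
      · intro hall; exact absurd h (hall k₀ le_rfl (by omega))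
    · rw [pvFind, if_neg h, ih]
      constructor
      · intro hall j h1 h2
        rcases eq_or_lt_of_le h1 with rfl | hlt
        · exact h
        · exact hall j (by omega) (by omega)
      · intro hall j h1 h2; exact hall j (by omega) (by omega)

lemma pvFind_some (f : Int → Int) (p : Int) (n : Nat) :
    ∀ (k₀ j : Int), pvFind f p k₀ n = some j →
      f j = p ∧ k₀ ≤ j ∧ j < k₀ + n ∧ ∀ i, k₀ ≤ i → i < j → f i ≠ p := by
  induction n with
  | zero => intro k₀ j h; cases h
  | succ n ih =>
    intro k₀ j h
    by_cases hc : f k₀ = p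
    · rw [pvFind, if_pos hc] at h
      cases h
      exact ⟨hc, le_rfl, by omega, fun i h1 h2 => by omega⟩
    · rw [pvFind, if_neg hc] at h
      obtain ⟨hj, h1, h2, hmin⟩ := ih (k₀ + 1) j h
      refine ⟨hj, by omega, by omega, fun i hi1 hi2 => ?_⟩
      rcases eq_or_lt_of_le hi1 with rfl | hlt
      · exact hc
      · exact hmin i (by omega) hi2

-- characterisation of A's inner while loop
lemma pvAWhile_spec (q : PySem.Dict Int String) (d : PySem.Dict Int Int) (m : Nat)
    (f : Int → Int) (x : Char) (p : Int)
    (hkeys : q.keys = pvKeys m)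
    (hd : ∀ k, d.getD k 0 = f k)
    (hf0 : ∀ k : Int, (k < 1 ∨ (m : Int) < k) → f k = 0)
    (hfb : ∀ k : Int, 0 ≤ f k ∧ f k ≤ 4)
    (hxp : ∀ j : Int, 0 ≤ j → j ≤ 4 → (x = pvQC j ↔ j = p)) :
    ∀ (fuel : Nat) (k₀ : Int), 1 ≤ k₀ → k₀ ≤ (m : Int) + 1 →
      ((m : Int) + 2 - k₀).toNat ≤ fuel →
      pvAWhile q d x k₀ fuel = pvFind f p k₀ ((m : Int) + 2 - k₀).toNat := by
  intro fuel
  induction fuel with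
  | zero => intro k₀ h1 h2 h3; omega
  | succ fuel ih =>
    intro k₀ h1 h2 h3
    have hb := hfb k₀
    rw [pvAWhile, hd k₀, pyGet?_quack (f k₀) hb.1 hb.2]
    dsimp only
    have hn : ((m : Int) + 2 - k₀).toNat = (((m : Int) + 1 - k₀).toNat) + 1 := by omega
    rw [hn, pvFind]
    by_cases hx : x = pvQC (f k₀)
    · have hfp : f k₀ = p := (hxp (f k₀) hb.1 hb.2).mp hx
      rw [if_pos hx, if_pos hfp]
    · have hfp : f k₀ ≠ p := fun he => hx ((hxp (f k₀) hb.1 hb.2).mpr he)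
      rw [if_neg hx, if_neg hfp, hkeys]
      by_cases hm : m = 0
      · subst hm
        rw [if_pos (show pvKeys 0 = [] from rfl)]
        have hk1 : k₀ = 1 := by omega
        subst hk1
        have hz : (((0 : Nat) : Int) + 1 - 1).toNat = 0 := by omega
        rw [hz]
        rfl
      · have hne : pvKeys m ≠ [] := by
          intro he
          have : ((1 : Int)) ∈ pvKeys m := (mem_pvKeys _ _).mpr ⟨le_rfl, by omega⟩
          rw [he] at this
          cases this
        rw [if_neg hne, pvMax_keys, if_neg hm]
        dsimp only
        by_cases hlt : (m : Int) < k₀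
        · rw [if_pos hlt]
          have hz : ((m : Int) + 1 - k₀).toNat = 0 := by omega
          rw [hz]
          rfl
        · rw [if_neg hlt]
          have := ih (k₀ + 1) (by omega) (by omega) (by omega)
          rw [this]
          have harg : ((m : Int) + 2 - (k₀ + 1)).toNat = ((m : Int) + 1 - k₀).toNat := by omega
          rw [harg]

lemma countP_update (n : Nat) (g g' : Nat → Bool) (i₀ : Nat) (h : i₀ < n)
    (hagree : ∀ i, i ≠ i₀ → g i = g' i) :
    ((List.range n).countP g' : Int) =
      ((List.range n).countP g : Int) + (if g' i₀ then 1 else 0) - (if g i₀ then 1 else 0) := by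
  induction n with
  | zero => omega
  | succ n ih =>
    rw [List.range_succ, List.countP_append, List.countP_append]
    by_cases hi : i₀ = n
    · subst hi
      have hcongr : (List.range i₀).countP g' = (List.range i₀).countP g :=
        List.countP_congr (fun a ha => by rw [hagree a (by have := List.mem_range.mp ha; omega)])
      rw [hcongr]
      simp only [List.countP_cons, List.countP_nil]
      push_cast
      split_ifs <;> omega
    · have ih' := ih (by omega)
      simp only [List.countP_cons, List.countP_nil]
      rw [hagree n (fun hh => hi hh.symm)]
      push_cast at ih' ⊢
      split_ifs at ih' ⊢ <;> omega

lemma pvReset_none (keys : List Int) (q : PySem.Dict Int String) (d : PySem.Dict Int Int)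
    (h : ∀ kk ∈ keys, q.getD kk "" ≠ "quack") : pvAReset keys q d = (q, d) := by
  induction keys with
  | nil => rfl
  | cons kk rest ih =>
    unfold pvAReset
    rw [List.foldl_cons, if_neg (h kk (List.mem_cons_self))]
    exact ih (fun k hk => h k (List.mem_cons_of_mem _ hk))

lemma pvReset_single (keys : List Int) (q : PySem.Dict Int String) (d : PySem.Dict Int Int)
    (j : Int) (hnd : keys.Nodup) (hj : j ∈ keys) (hq : q.getD j "" = "quack")
    (hother : ∀ kk ∈ keys, kk ≠ j → q.getD kk "" ≠ "quack") :
    pvAReset keys q d = (q.insert j "", d.insert j 0) := by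
  induction keys with
  | nil => cases hj
  | cons kk rest ih =>
    by_cases hkj : kk = j
    · subst hkj
      unfold pvAReset
      rw [List.foldl_cons, if_pos hq]
      have hnotin : kk ∉ rest := (List.nodup_cons.mp hnd).1
      have := pvReset_none rest (q.insert kk "") (d.insert kk 0)
        (fun k hk => by
          have hkne : k ≠ kk := fun he => hnotin (he ▸ hk)
          rw [PySem.Dict.getD_insert_of_ne q _ _ hkne]
          exact hother k (List.mem_cons_of_mem _ hk) hkne)
      exact this
    · unfold pvAReset
      rw [List.foldl_cons, if_neg (hother kk (List.mem_cons_self) hkj)]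
      have hj' : j ∈ rest := by
        rcases List.mem_cons.mp hj with h | h
        · exact absurd h.symm hkj
        · exact h
      exact ih (List.nodup_cons.mp hnd).2 hj'
        (fun k hk hkne => hother k (List.mem_cons_of_mem _ hk) hkne)

-- small facts about pvTakeQ / pvQC
lemma pvTakeQ_ne_quack (j : Int) (h0 : 0 ≤ j) (h4 : j ≤ 4) : pvTakeQ j ≠ "quack" := by
  rcases pvFive j h0 h4 with h | h | h | h | h <;> subst h <;> decide

lemma pvTakeQ_empty_iff (j : Int) (h0 : 0 ≤ j) (h4 : j ≤ 4) : pvTakeQ j = "" ↔ j = 0 := by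
  rcases pvFive j h0 h4 with h | h | h | h | h <;> subst h <;> simp [pvTakeQ]

lemma pvTakeQ_append (p : Int) (h0 : 0 ≤ p) (h4 : p ≤ 4) :
    pvTakeQ p ++ (pvQC p).toString = pvTakeQ (p + 1) := by
  rcases pvFive p h0 h4 with h | h | h | h | h <;> subst h <;> decide

-- hxp hypotheses for each character class
lemma pvHxp_q : ∀ j : Int, 0 ≤ j → j ≤ 4 → ('q' = pvQC j ↔ j = 0) := by
  intro j h0 h4; rcases pvFive j h0 h4 with h | h | h | h | h <;> subst h <;> decide
lemma pvHxp_u : ∀ j : Int, 0 ≤ j → j ≤ 4 → ('u' = pvQC j ↔ j = 1) := by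
  intro j h0 h4; rcases pvFive j h0 h4 with h | h | h | h | h <;> subst h <;> decide
lemma pvHxp_a : ∀ j : Int, 0 ≤ j → j ≤ 4 → ('a' = pvQC j ↔ j = 2) := by
  intro j h0 h4; rcases pvFive j h0 h4 with h | h | h | h | h <;> subst h <;> decide
lemma pvHxp_c : ∀ j : Int, 0 ≤ j → j ≤ 4 → ('c' = pvQC j ↔ j = 3) := by
  intro j h0 h4; rcases pvFive j h0 h4 with h | h | h | h | h <;> subst h <;> decide
lemma pvHxp_k : ∀ j : Int, 0 ≤ j → j ≤ 4 → ('k' = pvQC j ↔ j = 4) := by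
  intro j h0 h4; rcases pvFive j h0 h4 with h | h | h | h | h <;> subst h <;> decide
lemma pvHxp_other (x : Char) (n1 : x ≠ 'q') (n2 : x ≠ 'u') (n3 : x ≠ 'a') (n4 : x ≠ 'c')
    (n5 : x ≠ 'k') : ∀ j : Int, 0 ≤ j → j ≤ 4 → (x = pvQC j ↔ j = 5) := by
  intro j h0 h4
  rcases pvFive j h0 h4 with h | h | h | h | h <;> subst h <;>
    exact ⟨fun hx => absurd hx (by assumption), fun h5 => absurd h5 (by decide)⟩

-- dict facts derived from the items part of the invariant
lemma pvKeys_of_items (q : PySem.Dict Int String) (m : Nat) (f : Int → Int)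
    (h1 : q.items = (List.range m).map (fun (i : Nat) => (((i : Int) + 1), pvTakeQ (f ((i : Int) + 1))))) :
    q.keys = pvKeys m := by
  simp only [PySem.Dict.keys, h1, List.map_map, pvKeys]
  rfl

lemma pvGetD_in (q : PySem.Dict Int String) (m : Nat) (f : Int → Int)
    (h1 : q.items = (List.range m).map (fun (i : Nat) => (((i : Int) + 1), pvTakeQ (f ((i : Int) + 1)))))
    (k : Int) (hk1 : 1 ≤ k) (hk2 : k ≤ (m : Int)) : q.getD k "" = pvTakeQ (f k) := by
  have hkc : ((k - 1).toNat : Int) + 1 = k := by omega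
  apply PySem.Dict.getD_of_mem_items
  · rw [h1]
    exact List.mem_map.mpr ⟨(k - 1).toNat, List.mem_range.mpr (by omega), by rw [hkc]⟩
  · rw [pvKeys_of_items q m f h1]
    exact pvKeys_nodup m

lemma pvGetD_out (q : PySem.Dict Int String) (m : Nat) (f : Int → Int)
    (h1 : q.items = (List.range m).map (fun (i : Nat) => (((i : Int) + 1), pvTakeQ (f ((i : Int) + 1)))))
    (k : Int) (hk : k < 1 ∨ (m : Int) < k) : q.getD k "" = "" := by
  apply PySem.Dict.getD_of_not_contains
  rw [PySem.Dict.contains_eq_decide_mem_keys, pvKeys_of_items q m f h1]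
  simp only [decide_eq_false_iff_not, mem_pvKeys]
  omega

lemma pvContains_iff (q : PySem.Dict Int String) (m : Nat) (f : Int → Int)
    (h1 : q.items = (List.range m).map (fun (i : Nat) => (((i : Int) + 1), pvTakeQ (f ((i : Int) + 1)))))
    (k : Int) : q.contains k = true ↔ (1 ≤ k ∧ k ≤ (m : Int)) := by
  rw [PySem.Dict.contains_eq_decide_mem_keys, pvKeys_of_items q m f h1]
  simp only [decide_eq_true_eq, mem_pvKeys]

-- counting facts
lemma pvCnt_nonneg (m : Nat) (f : Int → Int) (v : Int) : 0 ≤ pvCnt m f v := Int.natCast_nonneg _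

lemma pvCnt_pos_iff (m : Nat) (f : Int → Int) (v : Int) :
    0 < pvCnt m f v ↔ ∃ j : Int, 1 ≤ j ∧ j ≤ (m : Int) ∧ f j = v := by
  unfold pvCnt
  rw [Int.natCast_pos, List.countP_pos_iff]
  constructor
  · rintro ⟨i, hi, hfi⟩
    have := List.mem_range.mp hi
    exact ⟨(i : Int) + 1, by omega, by omega, by simpa using hfi⟩
  · rintro ⟨j, h1, h2, h3⟩
    refine ⟨(j - 1).toNat, List.mem_range.mpr (by omega), ?_⟩
    have hkc : (((j - 1).toNat : Nat) : Int) + 1 = j := by omega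
    simp only [hkc, h3, decide_eq_true_eq]

lemma pvCnt_eq_zero_iff (m : Nat) (f : Int → Int) (v : Int) :
    pvCnt m f v = 0 ↔ ∀ j : Int, 1 ≤ j → j ≤ (m : Int) → f j ≠ v := by
  have h := pvCnt_pos_iff m f v
  have h2 := pvCnt_nonneg m f v
  constructor
  · intro hz j h1 hm hv
    have : 0 < pvCnt m f v := h.mpr ⟨j, h1, hm, hv⟩
    omega
  · intro hall
    by_contra hne
    obtain ⟨j, h1, hm, hv⟩ := h.mp (by omega)
    exact hall j h1 hm hv

lemma pvCnt_update (m : Nat) (f : Int → Int) (j w : Int) (h1 : 1 ≤ j) (h2 : j ≤ (m : Int))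
    (v : Int) :
    pvCnt m (fun k => if k = j then w else f k) v
      = pvCnt m f v + (if w = v then 1 else 0) - (if f j = v then 1 else 0) := by
  unfold pvCnt
  have hkc : (((j - 1).toNat : Nat) : Int) + 1 = j := by omega
  have := countP_update m (fun (i : Nat) => decide (f ((i : Int) + 1) = v))
    (fun (i : Nat) => decide ((if ((i : Int) + 1) = j then w else f ((i : Int) + 1)) = v))
    (j - 1).toNat (by omega)
    (fun i hi => by
      have hne : ((i : Int) + 1) ≠ j := by omega
      simp [hne])
  rw [this]
  simp only [hkc]
  congr 1
  · congr 1
    simp [hkc]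
  · simp

lemma pvCnt_congr (m : Nat) (f f' : Int → Int)
    (h : ∀ k : Int, 1 ≤ k → k ≤ (m : Int) → f k = f' k) (v : Int) :
    pvCnt m f v = pvCnt m f' v := by
  unfold pvCnt
  congr 1
  apply List.countP_congr
  intro i hi
  have := List.mem_range.mp hi
  rw [h ((i : Int) + 1) (by omega) (by omega)]

lemma pvCnt_succ (m : Nat) (f : Int → Int) (v : Int) :
    pvCnt (m + 1) f v = pvCnt m f v + (if f ((m : Int) + 1) = v then 1 else 0) := by
  unfold pvCnt
  rw [List.range_succ, List.countP_append]
  simp only [List.countP_cons, List.countP_nil]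
  push_cast
  rcases Decidable.em (f ((m : Int) + 1) = v) with h | h
  · rw [if_pos (by simpa using h), if_pos h]
    omega
  · rw [if_neg (by simpa using h), if_neg h]
    omega

lemma pvWhile_top (q : PySem.Dict Int String) (d : PySem.Dict Int Int) (m : Nat)
    (f : Int → Int) (x : Char) (p : Int)
    (hkeys : q.keys = pvKeys m)
    (hd : ∀ k, d.getD k 0 = f k)
    (hf0 : ∀ k : Int, (k < 1 ∨ (m : Int) < k) → f k = 0)
    (hfb : ∀ k : Int, 0 ≤ f k ∧ f k ≤ 4)
    (hxp : ∀ j : Int, 0 ≤ j → j ≤ 4 → (x = pvQC j ↔ j = p)) :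
    pvAWhile q d x 1 (((PySem.List.max? q.keys (fun y => y)).getD 0).toNat + 2)
      = pvFind f p 1 (m + 1) := by
  have happ := pvAWhile_spec q d m f x p hkeys hd hf0 hfb hxp
  have htn : (((m : Nat) : Int) + 2 - 1).toNat = m + 1 := by omega
  rw [hkeys, pvMax_keys]
  by_cases hm : m = 0
  · subst hm
    rw [if_pos rfl]
    have h2 := happ ((Option.getD (none : Option Int) 0).toNat + 2) 1 le_rfl (by omega) (by omega)
    rw [h2, htn]
  · rw [if_neg hm]
    have h2 := happ ((Option.getD (some ((m : Nat) : Int)) 0).toNat + 2) 1 le_rfl (by omega)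
      (by simp only [Option.getD]; omega)
    rw [h2, htn]

lemma pvStep_none (q : PySem.Dict Int String) (d : PySem.Dict Int Int) (m : Nat)
    (f : Int → Int) (x : Char) (p : Int)
    (hkeys : q.keys = pvKeys m)
    (hd : ∀ k, d.getD k 0 = f k)
    (hf0 : ∀ k : Int, (k < 1 ∨ (m : Int) < k) → f k = 0)
    (hfb : ∀ k : Int, 0 ≤ f k ∧ f k ≤ 4)
    (hxp : ∀ j : Int, 0 ≤ j → j ≤ 4 → (x = pvQC j ↔ j = p))
    (hF : pvFind f p 1 (m + 1) = none) :
    pvAStep (q, d) x = .error (-1) := by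
  unfold pvAStep
  dsimp only
  rw [pvWhile_top q d m f x p hkeys hd hf0 hfb hxp, hF]

lemma pvStep_some (q : PySem.Dict Int String) (d : PySem.Dict Int Int) (m : Nat)
    (f : Int → Int) (x : Char) (p : Int)
    (h1 : q.items = (List.range m).map (fun (i : Nat) => (((i : Int) + 1), pvTakeQ (f ((i : Int) + 1)))))
    (hd : ∀ k, d.getD k 0 = f k)
    (hf0 : ∀ k : Int, (k < 1 ∨ (m : Int) < k) → f k = 0)
    (hfb : ∀ k : Int, 0 ≤ f k ∧ f k ≤ 4)
    (hxp : ∀ j : Int, 0 ≤ j → j ≤ 4 → (x = pvQC j ↔ j = p))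
    (j : Int) (hF : pvFind f p 1 (m + 1) = some j) :
    ∃ Q D, pvAStep (q, d) x = .ok (Q, D) ∧
      pvInv Q D (if j = (m : Int) + 1 then m + 1 else m)
        (fun k => if k = j then (if p = 4 then 0 else p + 1) else f k) := by
  have hkeys := pvKeys_of_items q m f h1
  obtain ⟨hfj, hj1, hj2', hmin⟩ := pvFind_some f p (m + 1) 1 j hF
  have hj2 : j ≤ (m : Int) + 1 := by omega
  have hp0 : 0 ≤ p := hfj ▸ (hfb j).1
  have hp4 : p ≤ 4 := hfj ▸ (hfb j).2
  have hxeq : x = pvQC p := (hxp p hp0 hp4).mpr rfl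
  have hgetD : q.getD j "" = pvTakeQ p := by
    by_cases hjm : j ≤ (m : Int)
    · rw [pvGetD_in q m f h1 j hj1 hjm, hfj]
    · have hj0 : f j = 0 := hf0 j (Or.inr (by omega))
      have hp00 : p = 0 := by rw [← hfj, hj0]
      rw [pvGetD_out q m f h1 j (Or.inr (by omega)), hp00]
      rfl
  have hval : q.getD j "" ++ x.toString = pvTakeQ (p + 1) := by
    rw [hgetD, hxeq, pvTakeQ_append p hp0 hp4]
  have hdval : d.getD j 0 + 1 = p + 1 := by rw [hd j, hfj]
  have hstep : pvAStep (q, d) x =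
      .ok (pvAReset (q.insert j (q.getD j "" ++ x.toString)).keys
        (q.insert j (q.getD j "" ++ x.toString)) (d.insert j (d.getD j 0 + 1))) := by
    unfold pvAStep
    dsimp only
    rw [pvWhile_top q d m f x p hkeys hd hf0 hfb hxp, hF]
  rw [hval, hdval] at hstep
  have hd' : ∀ k, (d.insert j (p + 1)).getD k 0 = if k = j then p + 1 else f k := by
    intro k
    rw [PySem.Dict.getD_insert]
    by_cases hk : k = j <;> simp [hk, hd]
  by_cases hjm : j ≤ (m : Int)
  · -- the char goes to an existing duck j ≤ m
    have hjne : ¬ (j = (m : Int) + 1) := by omega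
    have hcont : q.contains j = true := (pvContains_iff q m f h1 j).mpr ⟨hj1, hjm⟩
    have hitems' : (q.insert j (pvTakeQ (p + 1))).items =
        (List.range m).map (fun (i : Nat) =>
          (((i : Int) + 1), pvTakeQ ((fun k => if k = j then p + 1 else f k) ((i : Int) + 1)))) := by
      rw [PySem.Dict.items_insert_of_contains q _ hcont, h1, List.map_map]
      apply List.map_congr_left
      intro i _
      dsimp only [Function.comp]
      by_cases hij : ((i : Int) + 1) = j
      · simp only [hij, beq_self_eq_true, if_true, if_pos rfl]
      · simp only [beq_iff_eq, hij, if_false, if_neg hij]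
    have hkeys' := pvKeys_of_items _ m (fun k => if k = j then p + 1 else f k) hitems'
    by_cases hp4e : p = 4
    · -- duck j completed "quack": the reset loop clears it
      have hreset : pvAReset (q.insert j (pvTakeQ (p + 1))).keys
          (q.insert j (pvTakeQ (p + 1))) (d.insert j (p + 1)) =
          ((q.insert j (pvTakeQ (p + 1))).insert j "", (d.insert j (p + 1)).insert j 0) := by
        rw [hkeys']
        apply pvReset_single _ _ _ j (pvKeys_nodup m) ((mem_pvKeys _ _).mpr ⟨hj1, hjm⟩)
        · rw [pvGetD_in _ m (fun k => if k = j then p + 1 else f k) hitems' j hj1 hjm, if_pos rfl, hp4e]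
          rfl
        · intro kk hkk hne
          obtain ⟨hk1, hk2⟩ := (mem_pvKeys _ _).mp hkk
          rw [pvGetD_in _ m (fun k => if k = j then p + 1 else f k) hitems' kk hk1 hk2, if_neg hne]
          exact pvTakeQ_ne_quack _ (hfb kk).1 (hfb kk).2
      refine ⟨_, _, by rw [hstep, hreset], ?_, ?_, ?_, ?_⟩
      · -- items of the doubly-updated dict
        have hcont2 : (q.insert j (pvTakeQ (p + 1))).contains j = true :=
          (pvContains_iff _ m (fun k => if k = j then p + 1 else f k) hitems' j).mpr ⟨hj1, hjm⟩
        rw [if_neg hjne]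
        rw [PySem.Dict.items_insert_of_contains _ _ hcont2, hitems', List.map_map]
        apply List.map_congr_left
        intro i _
        dsimp only [Function.comp]
        by_cases hij : ((i : Int) + 1) = j
        · simp only [hij, beq_self_eq_true, if_true, if_pos rfl, if_pos hp4e]
          rfl
        · simp only [beq_iff_eq, hij, if_false, if_neg hij]
      · intro k
        rw [PySem.Dict.getD_insert, hd' k]
        by_cases hk : k = j <;> simp [hk, hp4e]
      · intro k hk
        rw [if_neg hjne] at hk
        have : k ≠ j := by omega
        simp only [this, if_false]
        exact hf0 k hk
      · intro k
        by_cases hk : k = j <;> simp [hk, hp4e] <;> exact ⟨(hfb k).1, (hfb k).2⟩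
    · -- no duck completed: the reset loop is a no-op
      have hreset : pvAReset (q.insert j (pvTakeQ (p + 1))).keys
          (q.insert j (pvTakeQ (p + 1))) (d.insert j (p + 1)) =
          (q.insert j (pvTakeQ (p + 1)), d.insert j (p + 1)) := by
        rw [hkeys']
        apply pvReset_none
        intro kk hkk
        obtain ⟨hk1, hk2⟩ := (mem_pvKeys _ _).mp hkk
        rw [pvGetD_in _ m (fun k => if k = j then p + 1 else f k) hitems' kk hk1 hk2]
        by_cases hkj : kk = j
        · rw [if_pos hkj]
          exact pvTakeQ_ne_quack _ (by omega) (by omega)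
        · rw [if_neg hkj]
          exact pvTakeQ_ne_quack _ (hfb kk).1 (hfb kk).2
      refine ⟨_, _, by rw [hstep, hreset], ?_, ?_, ?_, ?_⟩
      · rw [if_neg hjne]
        simpa only [if_neg hp4e] using hitems'
      · intro k
        rw [hd' k]
        by_cases hk : k = j <;> simp [hk, hp4e]
      · intro k hk
        rw [if_neg hjne] at hk
        have : k ≠ j := by omega
        simp only [this, if_false]
        exact hf0 k hk
      · intro k
        by_cases hk : k = j <;> simp [hk, hp4e] <;> first | omega | exact ⟨(hfb k).1, (hfb k).2⟩
  · -- a brand-new duck j = m + 1 (only possible for 'q')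
    have hjeq : j = (m : Int) + 1 := by omega
    have hj0 : f j = 0 := hf0 j (Or.inr (by omega))
    have hp00 : p = 0 := by rw [← hfj, hj0]
    have hncont : q.contains j = false := by
      cases hc : q.contains j with
      | false => rfl
      | true => exact absurd ((pvContains_iff q m f h1 j).mp hc) (by omega)
    have hitems' : (q.insert j (pvTakeQ (p + 1))).items =
        (List.range (m + 1)).map (fun (i : Nat) =>
          (((i : Int) + 1), pvTakeQ ((fun k => if k = j then p + 1 else f k) ((i : Int) + 1)))) := by
      rw [PySem.Dict.items_insert_of_not_contains q _ hncont, h1, List.range_succ, List.map_append]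
      congr 1
      · apply List.map_congr_left
        intro i hi
        have him := List.mem_range.mp hi
        have hne : ((i : Int) + 1) ≠ j := by omega
        simp only [hne, if_false]
      · simp only [List.map_cons, List.map_nil]
        rw [← hjeq]
        simp
    have hkeys' := pvKeys_of_items _ (m + 1) (fun k => if k = j then p + 1 else f k) hitems'
    have hreset : pvAReset (q.insert j (pvTakeQ (p + 1))).keys
        (q.insert j (pvTakeQ (p + 1))) (d.insert j (p + 1)) =
        (q.insert j (pvTakeQ (p + 1)), d.insert j (p + 1)) := by
      rw [hkeys']
      apply pvReset_none
      intro kk hkk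
      obtain ⟨hk1, hk2⟩ := (mem_pvKeys _ _).mp hkk
      rw [pvGetD_in _ (m + 1) (fun k => if k = j then p + 1 else f k) hitems' kk hk1 hk2]
      by_cases hkj : kk = j
      · rw [if_pos hkj]
        exact pvTakeQ_ne_quack _ (by omega) (by omega)
      · rw [if_neg hkj]
        exact pvTakeQ_ne_quack _ (hfb kk).1 (hfb kk).2
    refine ⟨_, _, by rw [hstep, hreset], ?_, ?_, ?_, ?_⟩
    · rw [if_pos hjeq]
      simpa only [if_neg (show ¬ p = 4 by omega)] using hitems'
    · intro k
      rw [hd' k]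
      by_cases hk : k = j <;> simp [hk, show ¬ p = 4 by omega]
    · intro k hk
      rw [if_pos hjeq] at hk
      have : k ≠ j := by omega
      simp only [this, if_false]
      exact hf0 k (by omega)
    · intro k
      by_cases hk : k = j <;> simp [hk, show ¬ p = 4 by omega] <;>
        first | omega | exact ⟨(hfb k).1, (hfb k).2⟩

lemma pvValues_of_items (q : PySem.Dict Int String) (m : Nat) (f : Int → Int)
    (h1 : q.items = (List.range m).map (fun (i : Nat) => (((i : Int) + 1), pvTakeQ (f ((i : Int) + 1))))) :
    q.values = (List.range m).map (fun (i : Nat) => pvTakeQ (f ((i : Int) + 1))) := by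
  simp only [PySem.Dict.values, h1, List.map_map]
  rfl

-- main simulation lemma
lemma pvMain (xs : List Char) (q : PySem.Dict Int String) (d : PySem.Dict Int Int)
    (m : Nat) (f : Int → Int) (hInv : pvInv q d m f) :
    pvARun xs (q, d) =
      pvBGo xs (pvCnt m f 1) (pvCnt m f 2) (pvCnt m f 3) (pvCnt m f 4) (pvCnt m f 0) (m : Int) := by
  induction xs generalizing q d m f with
  | nil =>
    obtain ⟨h1, hd, hf0, hfb⟩ := hInv
    have hkeys := pvKeys_of_items q m f h1
    have hvals := pvValues_of_items q m f h1
    rw [pvARun, pvBGo]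
    dsimp only
    by_cases hall : ∀ jj : Int, 1 ≤ jj → jj ≤ (m : Int) → f jj = 0
    · have hany : (q.values.any (fun v => v != "")) = false := by
        rw [hvals]
        apply List.any_eq_false.mpr
        intro v hv
        obtain ⟨i, hi, rfl⟩ := List.mem_map.mp hv
        have him := List.mem_range.mp hi
        have hz : f ((i : Int) + 1) = 0 := hall _ (by omega) (by omega)
        simp [hz, pvTakeQ]
      have hc : ∀ v : Int, v ≠ 0 → pvCnt m f v = 0 := fun v hv =>
        (pvCnt_eq_zero_iff m f v).mpr (fun j a b h => hv (by rw [← h, hall j a b]))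
      have e1 : pvCnt m f 1 = 0 := hc 1 (by omega)
      have e2 : pvCnt m f 2 = 0 := hc 2 (by omega)
      have e3 : pvCnt m f 3 = 0 := hc 3 (by omega)
      have e4 : pvCnt m f 4 = 0 := hc 4 (by omega)
      rw [hany]
      rw [if_neg (by simp)]
      rw [e1, e2, e3, e4]
      rw [if_neg (by simp)]
      rw [hkeys, pvMax_keys]
      by_cases hm : m = 0
      · rw [if_pos hm, hm]
        simp
      · rw [if_neg hm]
    · push_neg at hall
      obtain ⟨j, h1j, h2j, h3j⟩ := hall
      have hkc : (((j - 1).toNat : Nat) : Int) + 1 = j := by omega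
      have hany : (q.values.any (fun v => v != "")) = true := by
        rw [hvals]
        apply List.any_eq_true.mpr
        refine ⟨pvTakeQ (f j), List.mem_map.mpr ⟨(j - 1).toNat, List.mem_range.mpr (by omega), by rw [hkc]⟩, ?_⟩
        have hne := (pvTakeQ_empty_iff (f j) (hfb j).1 (hfb j).2).not.mpr h3j
        simpa using hne
      rw [hany, if_pos rfl]
      have hpos : 0 < pvCnt m f (f j) := (pvCnt_pos_iff m f (f j)).mpr ⟨j, h1j, h2j, rfl⟩
      rcases pvFive (f j) (hfb j).1 (hfb j).2 with h | h | h | h | h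
      · exact absurd h h3j
      · rw [if_pos (Or.inl (by rw [← h]; omega))]
      · rw [if_pos (Or.inr (Or.inl (by rw [← h]; omega)))]
      · rw [if_pos (Or.inr (Or.inr (Or.inl (by rw [← h]; omega))))]
      · rw [if_pos (Or.inr (Or.inr (Or.inr (by rw [← h]; omega))))]
  | cons x xs ih =>
    obtain ⟨h1, hd, hf0, hfb⟩ := hInv
    have hkeys := pvKeys_of_items q m f h1
    by_cases hxq : x = 'q'
    · subst hxq
      cases hF : pvFind f 0 1 (m + 1) with
      | none =>
        exact absurd (hf0 ((m : Int) + 1) (Or.inr (by omega)))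
          ((pvFind_none_iff f 0 (m + 1) 1).mp hF ((m : Int) + 1) (by omega) (by push_cast; omega))
      | some j =>
        obtain ⟨Q, D, hstep, hInv'⟩ := pvStep_some q d m f 'q' 0 h1 hd hf0 hfb pvHxp_q j hF
        obtain ⟨hfj, hj1, hj2', hmin⟩ := pvFind_some f 0 (m + 1) 1 j hF
        rw [pvARun, hstep]
        show pvARun xs (Q, D) = _
        rw [pvBGo, if_pos rfl]
        have hf'eq : (fun k => if k = j then (if (0 : Int) = 4 then 0 else 0 + 1) else f k)
            = (fun k => if k = j then 1 else f k) := by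
          funext k
          norm_num
        rw [hf'eq] at hInv'
        by_cases hjm : j ≤ (m : Int)
        · -- reuse an idle duck
          have hidle : 0 < pvCnt m f 0 := (pvCnt_pos_iff m f 0).mpr ⟨j, hj1, hjm, hfj⟩
          rw [if_pos hidle]
          rw [if_neg (show ¬ j = (m : Int) + 1 by omega)] at hInv'
          rw [ih Q D m _ hInv']
          have hcu : ∀ v : Int, pvCnt m (fun k => if k = j then 1 else f k) v
              = pvCnt m f v + (if (1 : Int) = v then 1 else 0) - (if (0 : Int) = v then 1 else 0) := by
            intro v
            rw [pvCnt_update m f j 1 hj1 hjm v, hfj]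
          rw [hcu 1, hcu 2, hcu 3, hcu 4, hcu 0]
          norm_num
        · -- create a new duck
          have hjeq : j = (m : Int) + 1 := by omega
          have hidle : pvCnt m f 0 = 0 :=
            (pvCnt_eq_zero_iff m f 0).mpr (fun i a b h => hmin i a (by omega) h)
          rw [if_neg (by omega)]
          rw [if_pos hjeq] at hInv'
          rw [ih Q D (m + 1) _ hInv']
          have hcc : ∀ v : Int, pvCnt m (fun k => if k = j then 1 else f k) v = pvCnt m f v :=
            fun v => (pvCnt_congr m _ f (fun k a b => by rw [if_neg (show ¬ k = j by omega)]) v)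
          have hcs : ∀ v : Int, pvCnt (m + 1) (fun k => if k = j then 1 else f k) v
              = pvCnt m f v + (if (1 : Int) = v then 1 else 0) := by
            intro v
            rw [pvCnt_succ m _ v, hcc v, ← hjeq, if_pos rfl]
          rw [hcs 1, hcs 2, hcs 3, hcs 4, hcs 0, hidle]
          push_cast
          norm_num
    · by_cases hxu : x = 'u'
      · subst hxu
        cases hF : pvFind f 1 1 (m + 1) with
        | none =>
          have hstep := pvStep_none q d m f 'u' 1 hkeys hd hf0 hfb pvHxp_u hF
          have hrun : pvARun ('u' :: xs) (q, d) = -1 := by rw [pvARun, hstep]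
          rw [hrun, pvBGo, if_neg (by decide), if_pos rfl]
          have hc1 : pvCnt m f 1 = 0 := (pvCnt_eq_zero_iff m f 1).mpr
            (fun i a b h => (pvFind_none_iff f 1 (m + 1) 1).mp hF i a (by omega) h)
          rw [if_pos hc1]
        | some j =>
          obtain ⟨Q, D, hstep, hInv'⟩ := pvStep_some q d m f 'u' 1 h1 hd hf0 hfb pvHxp_u j hF
          obtain ⟨hfj, hj1, hj2', hmin⟩ := pvFind_some f 1 (m + 1) 1 j hF
          have hjm : j ≤ (m : Int) := by
            by_contra hcon
            have h0 := hf0 j (Or.inr (by omega))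
            omega
          rw [pvARun, hstep]
          show pvARun xs (Q, D) = _
          rw [pvBGo, if_neg (by decide), if_pos rfl]
          have hpos : pvCnt m f 1 ≠ 0 := by
            have := (pvCnt_pos_iff m f 1).mpr ⟨j, hj1, hjm, hfj⟩
            omega
          rw [if_neg hpos]
          have hf'eq : (fun k => if k = j then (if (1 : Int) = 4 then 0 else 1 + 1) else f k)
              = (fun k => if k = j then 2 else f k) := by
            funext k
            norm_num
          rw [hf'eq] at hInv'
          rw [if_neg (show ¬ j = (m : Int) + 1 by omega)] at hInv'
          rw [ih Q D m _ hInv']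
          have hcu : ∀ v : Int, pvCnt m (fun k => if k = j then 2 else f k) v
              = pvCnt m f v + (if (2 : Int) = v then 1 else 0) - (if (1 : Int) = v then 1 else 0) := by
            intro v
            rw [pvCnt_update m f j 2 hj1 hjm v, hfj]
          rw [hcu 1, hcu 2, hcu 3, hcu 4, hcu 0]
          norm_num
      · by_cases hxa : x = 'a'
        · subst hxa
          cases hF : pvFind f 2 1 (m + 1) with
          | none =>
            have hstep := pvStep_none q d m f 'a' 2 hkeys hd hf0 hfb pvHxp_a hF
            have hrun : pvARun ('a' :: xs) (q, d) = -1 := by rw [pvARun, hstep]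
            rw [hrun, pvBGo, if_neg (by decide), if_neg (by decide), if_pos rfl]
            have hc1 : pvCnt m f 2 = 0 := (pvCnt_eq_zero_iff m f 2).mpr
              (fun i a b h => (pvFind_none_iff f 2 (m + 1) 1).mp hF i a (by omega) h)
            rw [if_pos hc1]
          | some j =>
            obtain ⟨Q, D, hstep, hInv'⟩ := pvStep_some q d m f 'a' 2 h1 hd hf0 hfb pvHxp_a j hF
            obtain ⟨hfj, hj1, hj2', hmin⟩ := pvFind_some f 2 (m + 1) 1 j hF
            have hjm : j ≤ (m : Int) := by
              by_contra hcon
              have h0 := hf0 j (Or.inr (by omega))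
              omega
            rw [pvARun, hstep]
            show pvARun xs (Q, D) = _
            rw [pvBGo, if_neg (by decide), if_neg (by decide), if_pos rfl]
            have hpos : pvCnt m f 2 ≠ 0 := by
              have := (pvCnt_pos_iff m f 2).mpr ⟨j, hj1, hjm, hfj⟩
              omega
            rw [if_neg hpos]
            have hf'eq : (fun k => if k = j then (if (2 : Int) = 4 then 0 else 2 + 1) else f k)
                = (fun k => if k = j then 3 else f k) := by
              funext k
              norm_num
            rw [hf'eq] at hInv'
            rw [if_neg (show ¬ j = (m : Int) + 1 by omega)] at hInv'
            rw [ih Q D m _ hInv']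
            have hcu : ∀ v : Int, pvCnt m (fun k => if k = j then 3 else f k) v
                = pvCnt m f v + (if (3 : Int) = v then 1 else 0) - (if (2 : Int) = v then 1 else 0) := by
              intro v
              rw [pvCnt_update m f j 3 hj1 hjm v, hfj]
            rw [hcu 1, hcu 2, hcu 3, hcu 4, hcu 0]
            norm_num
        · by_cases hxc : x = 'c'
          · subst hxc
            cases hF : pvFind f 3 1 (m + 1) with
            | none =>
              have hstep := pvStep_none q d m f 'c' 3 hkeys hd hf0 hfb pvHxp_c hF
              have hrun : pvARun ('c' :: xs) (q, d) = -1 := by rw [pvARun, hstep]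
              rw [hrun, pvBGo, if_neg (by decide), if_neg (by decide), if_neg (by decide), if_pos rfl]
              have hc1 : pvCnt m f 3 = 0 := (pvCnt_eq_zero_iff m f 3).mpr
                (fun i a b h => (pvFind_none_iff f 3 (m + 1) 1).mp hF i a (by omega) h)
              rw [if_pos hc1]
            | some j =>
              obtain ⟨Q, D, hstep, hInv'⟩ := pvStep_some q d m f 'c' 3 h1 hd hf0 hfb pvHxp_c j hF
              obtain ⟨hfj, hj1, hj2', hmin⟩ := pvFind_some f 3 (m + 1) 1 j hF
              have hjm : j ≤ (m : Int) := by
                by_contra hcon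
                have h0 := hf0 j (Or.inr (by omega))
                omega
              rw [pvARun, hstep]
              show pvARun xs (Q, D) = _
              rw [pvBGo, if_neg (by decide), if_neg (by decide), if_neg (by decide), if_pos rfl]
              have hpos : pvCnt m f 3 ≠ 0 := by
                have := (pvCnt_pos_iff m f 3).mpr ⟨j, hj1, hjm, hfj⟩
                omega
              rw [if_neg hpos]
              have hf'eq : (fun k => if k = j then (if (3 : Int) = 4 then 0 else 3 + 1) else f k)
                  = (fun k => if k = j then 4 else f k) := by
                funext k
                norm_num
              rw [hf'eq] at hInv'
              rw [if_neg (show ¬ j = (m : Int) + 1 by omega)] at hInv'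
              rw [ih Q D m _ hInv']
              have hcu : ∀ v : Int, pvCnt m (fun k => if k = j then 4 else f k) v
                  = pvCnt m f v + (if (4 : Int) = v then 1 else 0) - (if (3 : Int) = v then 1 else 0) := by
                intro v
                rw [pvCnt_update m f j 4 hj1 hjm v, hfj]
              rw [hcu 1, hcu 2, hcu 3, hcu 4, hcu 0]
              norm_num
          · by_cases hxk : x = 'k'
            · subst hxk
              cases hF : pvFind f 4 1 (m + 1) with
              | none =>
                have hstep := pvStep_none q d m f 'k' 4 hkeys hd hf0 hfb pvHxp_k hF
                have hrun : pvARun ('k' :: xs) (q, d) = -1 := by rw [pvARun, hstep]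
                rw [hrun, pvBGo, if_neg (by decide), if_neg (by decide), if_neg (by decide), if_neg (by decide), if_pos rfl]
                have hc1 : pvCnt m f 4 = 0 := (pvCnt_eq_zero_iff m f 4).mpr
                  (fun i a b h => (pvFind_none_iff f 4 (m + 1) 1).mp hF i a (by omega) h)
                rw [if_pos hc1]
              | some j =>
                obtain ⟨Q, D, hstep, hInv'⟩ := pvStep_some q d m f 'k' 4 h1 hd hf0 hfb pvHxp_k j hF
                obtain ⟨hfj, hj1, hj2', hmin⟩ := pvFind_some f 4 (m + 1) 1 j hF
                have hjm : j ≤ (m : Int) := by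
                  by_contra hcon
                  have h0 := hf0 j (Or.inr (by omega))
                  omega
                rw [pvARun, hstep]
                show pvARun xs (Q, D) = _
                rw [pvBGo, if_neg (by decide), if_neg (by decide), if_neg (by decide), if_neg (by decide), if_pos rfl]
                have hpos : pvCnt m f 4 ≠ 0 := by
                  have := (pvCnt_pos_iff m f 4).mpr ⟨j, hj1, hjm, hfj⟩
                  omega
                rw [if_neg hpos]
                have hf'eq : (fun k => if k = j then (if (4 : Int) = 4 then 0 else 4 + 1) else f k)
                    = (fun k => if k = j then 0 else f k) := by
                  funext k
                  norm_num
                rw [hf'eq] at hInv'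
                rw [if_neg (show ¬ j = (m : Int) + 1 by omega)] at hInv'
                rw [ih Q D m _ hInv']
                have hcu : ∀ v : Int, pvCnt m (fun k => if k = j then 0 else f k) v
                    = pvCnt m f v + (if (0 : Int) = v then 1 else 0) - (if (4 : Int) = v then 1 else 0) := by
                  intro v
                  rw [pvCnt_update m f j 0 hj1 hjm v, hfj]
                rw [hcu 1, hcu 2, hcu 3, hcu 4, hcu 0]
                norm_num
            · -- x is not a letter of "quack"
              have hxp := pvHxp_other x hxq hxu hxa hxc hxk
              have hF : pvFind f 5 1 (m + 1) = none := (pvFind_none_iff f 5 (m + 1) 1).mpr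
                (fun i a b => by have := (hfb i).2; omega)
              have hstep := pvStep_none q d m f x 5 hkeys hd hf0 hfb hxp hF
              have hrun : pvARun (x :: xs) (q, d) = -1 := by rw [pvARun, hstep]
              rw [hrun, pvBGo, if_neg hxq, if_neg hxu, if_neg hxa, if_neg hxc, if_neg hxk]



-- ===== VERDICT (by name: the statement is the Claim_ definition above) =====
theorem duckduck_spec : Claim_equal_duckduck := by
  intro duck _ _
  unfold Spec_duckduck duckduck duckduck_alt
  have h := pvMain duck.toList PySem.Dict.empty PySem.Dict.empty 0 (fun _ => 0)
    ⟨by simp [PySem.Dict.items, PySem.Dict.empty], fun k => by simp [PySem.Dict.getD_empty],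
      fun k _ => rfl, fun k => by simp⟩
  simpa [pvCnt] using h
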